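-- pv_equiv track=rewrite | github.com/pypi-data/pypi-mirror-376 | packages/kazeflow/kazeflow-0.1.0a0-py3-none-any.whl/kazeflow/play.py | text_gantt
-- ===== SOURCE A (Python) =====
-- def text_gantt(records):
--     base = min(start for _, start, _ in records)
--     end_time = max(end for _, _, end in records)
--     length = int(end_time - base) + 1  # 秒単位
--
--     tasks = sorted(set(name for name, _, _ in records))
--
--     lines = []
--     for name in tasks:
--         line = [" "] * length
--         for n, start, end in records:
--             if n == name:
--                 s = int(start - base)
--                 e = int(end - base)
--                 for i in range(s, e):
--                     line[i] = "#"
--         lines.append(f"{name:>3} |{''.join(line)}|")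
--     return "\n".join(lines)
-- ===== SOURCE B (Python) =====
-- def text_gantt(records):
--     base = min(s for _, s, _ in records)
--     length = int(max(e for _, _, e in records) - base) + 1
--     by_name = {}
--     for name, s, e in records:
--         by_name.setdefault(name, []).append((int(s - base), int(e - base)))
--     out = []
--     for name in sorted(by_name):
--         # merge the task's non-empty intervals (sorted by start) into disjoint runs
--         runs = []
--         cur = None
--         for s, e in sorted((iv for iv in by_name[name] if iv[0] < iv[1]),
--                            key=lambda iv: iv[0]):
--             if cur is not None and s <= cur[1]:
--                 cur = (cur[0], max(cur[1], e))
--             else: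
--                 if cur is not None:
--                     runs.append(cur)
--                 cur = (s, e)
--         if cur is not None:
--             runs.append(cur)
--         # paint gaps and runs left to right, then pad to full width
--         pos = 0
--         parts = []
--         for s, e in runs:
--             parts.append(" " * (s - pos))
--             parts.append("#" * (e - s))
--             pos = e
--         parts.append(" " * (length - pos))
--         out.append(f"{name:>3} |{''.join(parts)}|")
--     return "\n".join(out)
-- ===== Notes on version B (the rewrite author's own statement) =====
-- stated objective: alternative
-- what changed: A paints each task's row cell by cell into a mutable array (one write per covered second per record); B groups records by name once, sorts each task's non-empty intervals, merges them into disjoint runs and emits the row as gap/run substrings.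
import Mathlib
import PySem

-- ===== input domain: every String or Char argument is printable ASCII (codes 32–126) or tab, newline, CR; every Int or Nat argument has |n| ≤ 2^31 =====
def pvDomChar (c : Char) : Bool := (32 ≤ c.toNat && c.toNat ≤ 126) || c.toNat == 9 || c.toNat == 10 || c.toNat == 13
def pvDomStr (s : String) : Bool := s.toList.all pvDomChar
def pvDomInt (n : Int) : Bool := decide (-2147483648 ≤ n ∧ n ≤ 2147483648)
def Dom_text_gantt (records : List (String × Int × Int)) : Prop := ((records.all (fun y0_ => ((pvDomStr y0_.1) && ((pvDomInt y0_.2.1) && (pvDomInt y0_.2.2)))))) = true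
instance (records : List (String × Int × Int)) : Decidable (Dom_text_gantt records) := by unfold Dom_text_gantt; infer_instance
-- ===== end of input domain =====

-- B replaces A's per-cell painting of a mutable row by grouping records per name,
-- sorting and merging each task's non-empty intervals into disjoint runs, and
-- emitting the row as gap/run substrings (objective: alternative algorithm).

-- ===== PORT A =====

-- f"{name:>3}" : right-justify to width 3 with spaces
def pvRjust3 (cs : List Char) : List Char := List.replicate (3 - cs.length) ' ' ++ cs

-- 'for i in range(s, e): line[i] = "#"'
def pvPaintRange (s e : Int) (line : List Char) : List Char :=
  (PySem.List.pyRange s e 1).foldl (fun l i => l.set i.toNat '#') line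

def text_gantt (records : List (String × Int × Int)) : String :=
  match PySem.List.min? (records.map (fun r => r.2.1)) (fun x => x),
        PySem.List.max? (records.map (fun r => r.2.2)) (fun x => x) with
  | some base, some endTime =>
      let length : Int := endTime - base + 1
      let tasks := PySem.List.sorted (PySem.Set.ofList (records.map (fun r => r.1))) (fun x => x) false
      let lines := tasks.foldl (fun acc name =>
        let line := records.foldl (fun line r =>
          if r.1 == name then pvPaintRange (r.2.1 - base) (r.2.2 - base) line else line)
          (List.replicate length.toNat ' ')
        acc ++ [pvRjust3 name.toList ++ [' ', '|'] ++ line ++ ['|']]) []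
      String.ofList (PySem.Chars.join ['\n'] lines)
  | _, _ => ""   -- records = [] : Python raises ValueError (min of empty); excluded by Pre_

-- ===== PORT B =====

-- f"{name:>3}" : right-justify to width 3 with spaces (B's own copy)
def pvRjust3B (cs : List Char) : List Char := List.replicate (3 - cs.length) ' ' ++ cs

-- merge step over intervals sorted by start: state = (finished runs, current run)
def pvMergeStep (st : List (Int × Int) × Option (Int × Int)) (iv : Int × Int) :
    List (Int × Int) × Option (Int × Int) :=
  match st.2 with
  | some c => if iv.1 ≤ c.2 then (st.1, some (c.1, max c.2 iv.2))
              else (st.1 ++ [c], some iv)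
  | none => (st.1, some iv)

-- 'if cur is not None: runs.append(cur)'
def pvFinalize (st : List (Int × Int) × Option (Int × Int)) : List (Int × Int) :=
  match st.2 with
  | some c => st.1 ++ [c]
  | none => st.1

-- gaps and runs left to right, then the trailing pad
def pvRender (length : Int) (runs : List (Int × Int)) : List Char :=
  let st := runs.foldl (fun (st : List Char × Int) r =>
    (st.1 ++ List.replicate (r.1 - st.2).toNat ' ' ++ List.replicate (r.2 - r.1).toNat '#', r.2))
    (([] : List Char), (0 : Int))
  st.1 ++ List.replicate (length - st.2).toNat ' '

def text_gantt_alt (records : List (String × Int × Int)) : String :=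
  match PySem.List.min? (records.map (fun r => r.2.1)) (fun x => x) with
  | none => ""   -- records = [] : excluded by Pre_
  | some base =>
    match PySem.List.max? (records.map (fun r => r.2.2)) (fun x => x) with
    | none => ""
    | some endTime =>
      let length : Int := endTime - base + 1
      let byName := records.foldl
        (fun d r => d.modify r.1 [] (fun l => l ++ [(r.2.1 - base, r.2.2 - base)]))
        (PySem.Dict.empty : PySem.Dict String (List (Int × Int)))
      let out := (PySem.List.sorted byName.keys (fun x => x) false).foldl (fun acc name =>
        let ivs := PySem.List.sorted ((byName.getD name []).filter (fun iv => decide (iv.1 < iv.2)))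
                     (fun iv => iv.1) false
        let runs := pvFinalize (ivs.foldl pvMergeStep ([], none))
        acc ++ [pvRjust3B name.toList ++ [' ', '|'] ++ pvRender length runs ++ ['|']]) []
      String.ofList (PySem.Chars.join ['\n'] out)

-- ===== PRECONDITION & SPEC =====
-- Python A raises ValueError (min() of an empty sequence) iff records = []
def Pre_text_gantt (records : List (String × Int × Int)) : Prop := records ≠ []
instance (records : List (String × Int × Int)) : Decidable (Pre_text_gantt records) := by
  unfold Pre_text_gantt; infer_instance

def pvWitness_text_gantt : (List (String × Int × Int)) :=
  [("a", 0, 3), ("b", 1, 2), ("a", 2, 5), ("b", 4, 4)]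

def Spec_text_gantt (records : List (String × Int × Int)) (out : String) : Prop := out = text_gantt_alt records
instance (records : List (String × Int × Int)) (out : String) : Decidable (Spec_text_gantt records out) := by unfold Spec_text_gantt; infer_instance

-- ===== CLAIM (what is proved, stated in full; the proofs are below) =====
def Claim_equal_text_gantt : Prop := ∀ (records : List (String × Int × Int)), Dom_text_gantt records → Pre_text_gantt records → Spec_text_gantt records (text_gantt records)

-- ===== LEMMAS AND PROOFS =====

-- coverage predicate: does any interval of ivs cover second j?
def pvCov (ivs : List (Int × Int)) (j : Int) : Bool :=
  ivs.any (fun p => decide (p.1 ≤ j) && decide (j < p.2))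

-- the canonical row segment for seconds a ≤ j < b under coverage cov
def pvCanon (cov : Int → Bool) (a b : Int) : List Char :=
  (PySem.List.pyRange a b 1).map (fun j => if cov j then '#' else ' ')

-- the intervals of the records named `name`, shifted by base
def pvIvsOf (recs : List (String × Int × Int)) (name : String) (base : Int) : List (Int × Int) :=
  (recs.filter (fun r => r.1 == name)).map (fun r => (r.2.1 - base, r.2.2 - base))

theorem pvBoolExt {x y : Bool} (h : x = true ↔ y = true) : x = y := by
  cases x <;> cases y <;> simp_all

theorem pvCov_iff (ivs : List (Int × Int)) (j : Int) :
    pvCov ivs j = true ↔ ∃ p ∈ ivs, p.1 ≤ j ∧ j < p.2 := by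
  simp [pvCov]

theorem pvCov_nil (j : Int) : pvCov [] j = false := rfl

theorem pvCov_cons (x : Int × Int) (xs : List (Int × Int)) (j : Int) :
    pvCov (x :: xs) j = ((decide (x.1 ≤ j) && decide (j < x.2)) || pvCov xs j) := by
  simp [pvCov]

theorem pvCov_append (xs ys : List (Int × Int)) (j : Int) :
    pvCov (xs ++ ys) j = (pvCov xs j || pvCov ys j) := by
  simp [pvCov, List.any_append]

theorem pvCanon_congr (cov cov' : Int → Bool) (a b : Int)
    (h : ∀ j, a ≤ j → j < b → cov j = cov' j) : pvCanon cov a b = pvCanon cov' a b := by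
  unfold pvCanon
  apply List.map_congr_left
  intro j hj
  rw [PySem.List.mem_pyRange_one] at hj
  rw [h j hj.1 hj.2]

theorem pvCanon_const_false (cov : Int → Bool) (a b : Int)
    (h : ∀ j, a ≤ j → j < b → cov j = false) :
    pvCanon cov a b = List.replicate (b - a).toNat ' ' := by
  unfold pvCanon
  rw [List.map_congr_left (g := fun _ => ' ') (by
    intro j hj
    rw [PySem.List.mem_pyRange_one] at hj
    rw [h j hj.1 hj.2]
    rfl)]
  rw [List.map_const', PySem.List.length_pyRange_one]

theorem pvCanon_const_true (cov : Int → Bool) (a b : Int)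
    (h : ∀ j, a ≤ j → j < b → cov j = true) :
    pvCanon cov a b = List.replicate (b - a).toNat '#' := by
  unfold pvCanon
  rw [List.map_congr_left (g := fun _ => '#') (by
    intro j hj
    rw [PySem.List.mem_pyRange_one] at hj
    rw [h j hj.1 hj.2]
    rfl)]
  rw [List.map_const', PySem.List.length_pyRange_one]

theorem pvCanon_split (cov : Int → Bool) (a m b : Int) (h1 : a ≤ m) (h2 : m ≤ b) :
    pvCanon cov a b = pvCanon cov a m ++ pvCanon cov m b := by
  unfold pvCanon
  rw [PySem.List.pyRange_one_append a m b h1 h2, List.map_append]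

-- ---- A side ----

theorem length_pvPaintRange (s e : Int) (l : List Char) :
    (pvPaintRange s e l).length = l.length := by
  unfold pvPaintRange
  generalize PySem.List.pyRange s e 1 = is
  induction is generalizing l with
  | nil => rfl
  | cons i is ih => simp only [List.foldl_cons]; rw [ih, List.length_set]

theorem getElem?_pvPaintRange_go (e : Int) :
    ∀ (n : Nat) (s : Int), 0 ≤ s → (e - s).toNat ≤ n → ∀ (l : List Char) (p : Nat),
    (pvPaintRange s e l)[p]?
      = if s ≤ (p : Int) ∧ (p : Int) < e ∧ p < l.length then some '#' else l[p]? := by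
  intro n
  induction n with
  | zero =>
    intro s hs hn l p
    unfold pvPaintRange
    rw [PySem.List.pyRange_one_eq_nil (by omega)]
    simp only [List.foldl_nil]
    split_ifs with h
    · omega
    · rfl
  | succ n ih =>
    intro s hs hn l p
    by_cases hlt : s < e
    · unfold pvPaintRange at ih ⊢
      rw [PySem.List.pyRange_one_cons hlt]
      simp only [List.foldl_cons]
      rw [ih (s + 1) (by omega) (by omega) (l.set s.toNat '#') p]
      rw [List.getElem?_set]
      simp only [List.length_set]
      by_cases hB : s + 1 ≤ (p : Int) ∧ (p : Int) < e ∧ p < l.length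
      · rw [if_pos hB, if_pos (show s ≤ (p : Int) ∧ (p : Int) < e ∧ p < l.length by omega)]
      · rw [if_neg hB]
        by_cases hC : s.toNat = p
        · rw [if_pos hC]
          by_cases hD : s.toNat < l.length
          · rw [if_pos hD, if_pos (by omega)]
          · rw [if_neg hD, if_neg (by omega)]
            exact (List.getElem?_eq_none (by omega)).symm
        · rw [if_neg hC, if_neg (by omega)]
    · unfold pvPaintRange
      rw [PySem.List.pyRange_one_eq_nil (by omega)]
      simp only [List.foldl_nil]
      split_ifs with h
      · omega
      · rfl

theorem getElem?_pvPaintRange (s e : Int) (hs : 0 ≤ s) (l : List Char) (p : Nat) :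
    (pvPaintRange s e l)[p]?
      = if s ≤ (p : Int) ∧ (p : Int) < e ∧ p < l.length then some '#' else l[p]? :=
  getElem?_pvPaintRange_go e (e - s).toNat s hs le_rfl l p

theorem getElem?_pvALine (name : String) (base : Int) :
    ∀ (recs : List (String × Int × Int)), (∀ r ∈ recs, base ≤ r.2.1) →
    ∀ (l : List Char) (p : Nat),
    (recs.foldl (fun line r =>
        if r.1 == name then pvPaintRange (r.2.1 - base) (r.2.2 - base) line else line) l)[p]?
      = if pvCov (pvIvsOf recs name base) p = true ∧ p < l.length then some '#' else l[p]? := by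
  intro recs
  induction recs with
  | nil =>
    intro _ l p
    simp [pvIvsOf, pvCov]
  | cons r recs ih =>
    intro h l p
    simp only [List.foldl_cons]
    by_cases hr : r.1 == name
    · rw [if_pos hr]
      rw [ih (fun x hx => h x (List.mem_cons_of_mem _ hx)) (pvPaintRange _ _ l) p]
      rw [getElem?_pvPaintRange _ _ (by have := h r (List.mem_cons_self ..); omega) l p]
      rw [length_pvPaintRange]
      have hcov : pvCov (pvIvsOf (r :: recs) name base) ↑p
          = ((decide (r.2.1 - base ≤ (p : Int)) && decide ((p : Int) < r.2.2 - base))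
              || pvCov (pvIvsOf recs name base) ↑p) := by
        simp [pvIvsOf, pvCov, hr]
      rw [hcov]
      simp only [Bool.or_eq_true, Bool.and_eq_true, decide_eq_true_eq]
      split_ifs <;> first | rfl | tauto
    · rw [if_neg hr]
      rw [ih (fun x hx => h x (List.mem_cons_of_mem _ hx)) l p]
      have hcov : pvIvsOf (r :: recs) name base = pvIvsOf recs name base := by
        simp [pvIvsOf, hr]
      rw [hcov]

theorem pvALine_eq_canon (recs : List (String × Int × Int)) (name : String) (base len : Int)
    (h : ∀ r ∈ recs, base ≤ r.2.1) :
    recs.foldl (fun line r =>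
        if r.1 == name then pvPaintRange (r.2.1 - base) (r.2.2 - base) line else line)
      (List.replicate len.toNat ' ')
    = pvCanon (fun j => pvCov (pvIvsOf recs name base) j) 0 len := by
  apply List.ext_getElem?
  intro p
  rw [getElem?_pvALine name base recs h _ p]
  unfold pvCanon
  simp only [List.getElem?_map, PySem.List.getElem?_pyRange_one, List.length_replicate,
    List.getElem?_replicate, Int.sub_zero, Int.zero_add]
  by_cases hc : pvCov (pvIvsOf recs name base) ↑p = true <;>
    by_cases hp : p < len.toNat <;>
    simp [hc, hp]

-- ---- B side ----

set_option maxHeartbeats 1000000 in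
theorem pvMerge_go (len : Int) (ivs : List (Int × Int)) :
    ∀ (runs : List (Int × Int)) (c : Int × Int),
    (∀ iv ∈ ivs, c.1 ≤ iv.1 ∧ iv.1 < iv.2 ∧ 0 ≤ iv.1 ∧ iv.2 ≤ len) →
    ivs.Pairwise (fun a b => a.1 ≤ b.1) →
    (runs ++ [c]).Pairwise (fun a b => a.2 < b.1) →
    (∀ r ∈ runs ++ [c], r.1 < r.2 ∧ 0 ≤ r.1 ∧ r.2 ≤ len) →
    (pvFinalize (ivs.foldl pvMergeStep (runs, some c))).Pairwise (fun a b => a.2 < b.1) ∧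
    (∀ r ∈ pvFinalize (ivs.foldl pvMergeStep (runs, some c)), r.1 < r.2 ∧ 0 ≤ r.1 ∧ r.2 ≤ len) ∧
    (∀ j : Int, pvCov (pvFinalize (ivs.foldl pvMergeStep (runs, some c))) j
        = (pvCov (runs ++ [c]) j || pvCov ivs j)) := by
  induction ivs with
  | nil =>
    intro runs c _ _ h3 h4
    refine ⟨h3, h4, ?_⟩
    intro j
    simp [pvFinalize, pvCov]
  | cons iv rest ih =>
    intro runs c h1 h2 h3 h4
    obtain ⟨hiv, hrest⟩ := List.pairwise_cons.mp h2
    have hiv1 := h1 iv (List.mem_cons_self ..)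
    have hc := h4 c (by simp)
    simp only [List.foldl_cons]
    have hstep : pvMergeStep (runs, some c) iv
        = if iv.1 ≤ c.2 then (runs, some (c.1, max c.2 iv.2)) else (runs ++ [c], some iv) := rfl
    rw [hstep]
    by_cases hle : iv.1 ≤ c.2
    · rw [if_pos hle]
      obtain ⟨hruns, -, hcross⟩ := List.pairwise_append.mp h3
      obtain ⟨p1, p2, p3⟩ := ih runs (c.1, max c.2 iv.2)
        (fun x hx => ⟨le_trans hiv1.1 (hiv x hx), (h1 x (List.mem_cons_of_mem _ hx)).2⟩)
        hrest
        (List.pairwise_append.mpr ⟨hruns, by simp, by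
          intro a ha b hb
          simp only [List.mem_singleton] at hb
          subst hb
          exact hcross a ha c (by simp)⟩)
        (by
          intro r hr
          rcases List.mem_append.mp hr with h | h
          · exact h4 r (List.mem_append.mpr (Or.inl h))
          · simp only [List.mem_singleton] at h
            subst h
            refine ⟨by omega, by omega, by omega⟩)
      refine ⟨p1, p2, ?_⟩
      intro j
      rw [p3 j]
      apply pvBoolExt
      simp only [pvCov_append, pvCov_cons, pvCov_nil, Bool.or_false, Bool.or_eq_true,
        Bool.and_eq_true, decide_eq_true_eq]
      have hm : (c.1 ≤ j ∧ j < max c.2 iv.2) ↔ ((c.1 ≤ j ∧ j < c.2) ∨ (iv.1 ≤ j ∧ j < iv.2)) := by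
        have := hiv1.1
        omega
      rw [hm]
      tauto
    · rw [if_neg hle]
      obtain ⟨hruns, -, hcross⟩ := List.pairwise_append.mp h3
      obtain ⟨p1, p2, p3⟩ := ih (runs ++ [c]) iv
        (fun x hx => ⟨hiv x hx, (h1 x (List.mem_cons_of_mem _ hx)).2⟩)
        hrest
        (List.pairwise_append.mpr ⟨h3, by simp, by
          intro a ha b hb
          simp only [List.mem_singleton] at hb
          subst hb
          rcases List.mem_append.mp ha with h | h
          · have := hcross a h c (by simp)
            omega
          · simp only [List.mem_singleton] at h
            subst h
            omega⟩)
        (by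
          intro r hr
          rcases List.mem_append.mp hr with h | h
          · exact h4 r h
          · simp only [List.mem_singleton] at h
            subst h
            exact ⟨hiv1.2.1, hiv1.2.2⟩)
      refine ⟨p1, p2, ?_⟩
      intro j
      rw [p3 j]
      apply pvBoolExt
      simp only [pvCov_append, pvCov_cons, pvCov_nil, Bool.or_false, Bool.or_eq_true,
        Bool.and_eq_true, decide_eq_true_eq]
      tauto

set_option maxHeartbeats 1000000 in
theorem pvRender_go (len : Int) (runs : List (Int × Int)) :
    ∀ (acc : List Char) (pos : Int),
    0 ≤ pos → pos ≤ len →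
    (∀ r ∈ runs, r.1 < r.2 ∧ r.2 ≤ len) →
    runs.Pairwise (fun a b => a.2 < b.1) →
    (∀ r ∈ runs, pos ≤ r.1) →
    (runs.foldl (fun (st : List Char × Int) r =>
        (st.1 ++ List.replicate (r.1 - st.2).toNat ' ' ++ List.replicate (r.2 - r.1).toNat '#', r.2))
        (acc, pos)).1
      ++ List.replicate
          (len - (runs.foldl (fun (st : List Char × Int) r =>
            (st.1 ++ List.replicate (r.1 - st.2).toNat ' ' ++ List.replicate (r.2 - r.1).toNat '#', r.2))
            (acc, pos)).2).toNat ' '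
      = acc ++ pvCanon (fun j => pvCov runs j) pos len := by
  induction runs with
  | nil =>
    intro acc pos h0 hl _ _ _
    simp only [List.foldl_nil]
    rw [pvCanon_const_false (fun j => pvCov [] j) pos len (fun j _ _ => rfl)]
  | cons c rest ih =>
    intro acc pos h0 hl hb hp hpos
    have hc := hb c (List.mem_cons_self ..)
    have hposc := hpos c (List.mem_cons_self ..)
    obtain ⟨hpr, hpt⟩ := List.pairwise_cons.mp hp
    simp only [List.foldl_cons]
    rw [ih (acc ++ List.replicate (c.1 - pos).toNat ' ' ++ List.replicate (c.2 - c.1).toNat '#')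
        c.2 (by omega) (by omega)
        (fun r hr => hb r (List.mem_cons_of_mem _ hr)) hpt
        (fun r hr => le_of_lt (hpr r hr))]
    have hsplit1 : pvCanon (fun j => pvCov (c :: rest) j) pos len
        = pvCanon (fun j => pvCov (c :: rest) j) pos c.1
          ++ pvCanon (fun j => pvCov (c :: rest) j) c.1 len :=
      pvCanon_split _ pos c.1 len hposc (by omega)
    have hsplit2 : pvCanon (fun j => pvCov (c :: rest) j) c.1 len
        = pvCanon (fun j => pvCov (c :: rest) j) c.1 c.2
          ++ pvCanon (fun j => pvCov (c :: rest) j) c.2 len :=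
      pvCanon_split _ c.1 c.2 len (by omega) (by omega)
    have hseg1 : pvCanon (fun j => pvCov (c :: rest) j) pos c.1
        = List.replicate (c.1 - pos).toNat ' ' := by
      apply pvCanon_const_false
      intro j hj1 hj2
      rw [Bool.eq_false_iff]
      intro hcontra
      rw [pvCov_iff] at hcontra
      obtain ⟨p, hpmem, hp1, hp2⟩ := hcontra
      rcases List.mem_cons.mp hpmem with h | h
      · subst h; omega
      · have := hpr p h; omega
    have hseg2 : pvCanon (fun j => pvCov (c :: rest) j) c.1 c.2
        = List.replicate (c.2 - c.1).toNat '#' := by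
      apply pvCanon_const_true
      intro j hj1 hj2
      exact (pvCov_iff _ _).mpr ⟨c, List.mem_cons_self .., by omega, by omega⟩
    have hseg3 : pvCanon (fun j => pvCov (c :: rest) j) c.2 len
        = pvCanon (fun j => pvCov rest j) c.2 len := by
      apply pvCanon_congr
      intro j hj1 hj2
      simp only [pvCov, List.any_cons]
      have h2 : decide (j < c.2) = false := by simp; omega
      simp [h2]
    rw [hsplit1, hsplit2, hseg1, hseg2, hseg3]
    simp [List.append_assoc]

-- B's whole row for one task equals the canonical row of its raw intervals
theorem pvBLine_eq_canon (len : Int) (ivs0 : List (Int × Int))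
    (hlen : ∀ iv ∈ ivs0, 0 ≤ iv.1 ∧ iv.2 ≤ len - 1) :
    pvRender len (pvFinalize ((PySem.List.sorted (ivs0.filter (fun iv => decide (iv.1 < iv.2)))
        (fun iv => iv.1) false).foldl pvMergeStep ([], none)))
    = pvCanon (fun j => pvCov ivs0 j) 0 len := by
  set S := PySem.List.sorted (ivs0.filter (fun iv => decide (iv.1 < iv.2))) (fun iv => iv.1) false
    with hS
  have hmemS : ∀ iv ∈ S, iv.1 < iv.2 ∧ 0 ≤ iv.1 ∧ iv.2 ≤ len := by
    intro iv hiv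
    rw [hS, PySem.List.mem_sorted, List.mem_filter] at hiv
    obtain ⟨hm, hlt⟩ := hiv
    have h1 := hlen iv hm
    simp only [decide_eq_true_eq] at hlt
    exact ⟨hlt, h1.1, by omega⟩
  have hpairS : S.Pairwise (fun a b => a.1 ≤ b.1) := PySem.List.sorted_pairwise _ _
  have hcovS : ∀ j, pvCov S j = pvCov ivs0 j := by
    intro j
    apply pvBoolExt
    rw [pvCov_iff, pvCov_iff]
    constructor
    · rintro ⟨p, hp, h1, h2⟩
      rw [hS, PySem.List.mem_sorted, List.mem_filter] at hp
      exact ⟨p, hp.1, h1, h2⟩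
    · rintro ⟨p, hp, h1, h2⟩
      refine ⟨p, ?_, h1, h2⟩
      rw [hS, PySem.List.mem_sorted, List.mem_filter]
      exact ⟨hp, by simp only [decide_eq_true_eq]; omega⟩
  clear hS
  cases hSc : S with
  | nil =>
    rw [hSc] at hcovS
    simp only [List.foldl_nil, pvFinalize, pvRender, List.nil_append]
    rw [pvCanon_const_false (fun j => pvCov ivs0 j) 0 len (fun j _ _ => by show pvCov ivs0 j = false; rw [← hcovS j]; rfl)]
  | cons iv0 restS =>
    rw [hSc] at hmemS hpairS hcovS
    obtain ⟨hp0, hpt⟩ := List.pairwise_cons.mp hpairS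
    have h0 := hmemS iv0 (List.mem_cons_self ..)
    simp only [List.foldl_cons]
    have hstep : pvMergeStep ([], none) iv0 = ([], some iv0) := rfl
    rw [hstep]
    obtain ⟨hRpair, hRmem, hRcov⟩ := pvMerge_go len restS [] iv0
      (fun iv hiv => ⟨hp0 iv hiv, (hmemS iv (List.mem_cons_of_mem _ hiv)).1,
        (hmemS iv (List.mem_cons_of_mem _ hiv)).2.1, (hmemS iv (List.mem_cons_of_mem _ hiv)).2.2⟩)
      hpt (by simp)
      (by
        intro r hr
        simp only [List.nil_append, List.mem_singleton] at hr
        subst hr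
        exact h0)
    unfold pvRender
    rw [pvRender_go len _ [] 0 le_rfl (by omega)
        (fun r hr => ⟨(hRmem r hr).1, (hRmem r hr).2.2⟩) hRpair
        (fun r hr => (hRmem r hr).2.1)]
    simp only [List.nil_append]
    apply pvCanon_congr
    intro j _ _
    rw [hRcov j, ← hcovS j]
    simp [pvCov]

-- ---- assembling both programs ----

theorem text_gantt_eq (records : List (String × Int × Int)) :
    text_gantt records = text_gantt_alt records := by
  unfold text_gantt text_gantt_alt
  cases hmin : PySem.List.min? (records.map (fun r => r.2.1)) (fun x => x) with
  | none =>
    cases hmax : PySem.List.max? (records.map (fun r => r.2.2)) (fun x => x) <;> rfl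
  | some base =>
    cases hmax : PySem.List.max? (records.map (fun r => r.2.2)) (fun x => x) with
    | none => rfl
    | some endTime =>
      simp only []
      have hbase : ∀ r ∈ records, base ≤ r.2.1 := fun r hr =>
        PySem.List.min?_isMin hmin _ (List.mem_map_of_mem hr)
      have hend : ∀ r ∈ records, r.2.2 ≤ endTime := fun r hr =>
        PySem.List.max?_isMax hmax _ (List.mem_map_of_mem hr)
      have hkeys : (records.foldl
          (fun d r => d.modify r.1 [] (fun l => l ++ [(r.2.1 - base, r.2.2 - base)]))
          (PySem.Dict.empty : PySem.Dict String (List (Int × Int)))).keys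
          = PySem.Set.ofList (records.map (fun r => r.1)) := by
        rw [PySem.Dict.keys_foldl_modify_key records (fun r => r.1) []
          (fun _ r => fun l => l ++ [(r.2.1 - base, r.2.2 - base)]) PySem.Dict.empty]
        rw [PySem.Dict.keys_empty, PySem.Set.update_nil_left]
      have hgetD : ∀ name, (records.foldl
          (fun d r => d.modify r.1 [] (fun l => l ++ [(r.2.1 - base, r.2.2 - base)]))
          (PySem.Dict.empty : PySem.Dict String (List (Int × Int)))).getD name []
          = pvIvsOf records name base := by
        intro name
        have h1 := PySem.Dict.getD_foldl_modify_append
          (records.map (fun r => (r.1, (r.2.1 - base, r.2.2 - base)))) PySem.Dict.empty name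
        rw [List.foldl_map] at h1
        simp only [PySem.Dict.getD_empty, List.nil_append, List.filter_map, List.map_map] at h1
        rw [h1]
        simp [pvIvsOf, Function.comp_def]
      rw [hkeys]
      rw [PySem.List.foldl_append_singleton_eq_map, PySem.List.foldl_append_singleton_eq_map]
      congr 1
      apply congrArg
      apply congrArg
      apply List.map_congr_left
      intro name _
      have hline : records.foldl (fun line r =>
            if r.1 == name then pvPaintRange (r.2.1 - base) (r.2.2 - base) line else line)
          (List.replicate (endTime - base + 1).toNat ' ')
          = pvCanon (fun j => pvCov (pvIvsOf records name base) j) 0 (endTime - base + 1) :=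
        pvALine_eq_canon records name base (endTime - base + 1) hbase
      have hlineB : pvRender (endTime - base + 1)
          (pvFinalize ((PySem.List.sorted ((pvIvsOf records name base).filter
              (fun iv => decide (iv.1 < iv.2))) (fun iv => iv.1) false).foldl pvMergeStep ([], none)))
          = pvCanon (fun j => pvCov (pvIvsOf records name base) j) 0 (endTime - base + 1) := by
        apply pvBLine_eq_canon
        intro iv hiv
        simp only [pvIvsOf, List.mem_map, List.mem_filter] at hiv
        obtain ⟨r, ⟨hrmem, -⟩, hr2⟩ := hiv
        subst hr2
        have hb1 := hbase r hrmem
        have hb2 := hend r hrmem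
        constructor <;> dsimp <;> omega
      rw [hline, hgetD name, hlineB]
      simp only [pvRjust3, pvRjust3B]

-- ===== VERDICT (by name: the statement is the Claim_ definition above) =====
theorem text_gantt_spec : Claim_equal_text_gantt := by
  intro records _ _
  unfold Spec_text_gantt
  exact text_gantt_eq records
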